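-- pv_equiv track=rewrite | github.com/LexLattice/adeu-studio | apps/api/scripts/lint_closeout_consistency.py | _extract_assertion_blocks
-- ===== SOURCE A (Python) =====
-- def _extract_assertion_blocks(doc_text: str) -> list[str]:
--     heading = "## Metric-Key Continuity Assertion"
--     blocks: list[str] = []
--     lines = doc_text.splitlines()
--     index = 0
--     while index < len(lines):
--         if lines[index].strip() != heading:
--             index += 1
--             continue
--         index += 1
--         while index < len(lines) and lines[index].strip() == "":
--             index += 1
--         if index >= len(lines) or lines[index].strip() != "```json":
--             blocks.append("")
--             continue
--         index += 1
--         block_lines: list[str] = []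
--         while index < len(lines) and lines[index].strip() != "```":
--             block_lines.append(lines[index])
--             index += 1
--         if index >= len(lines):
--             blocks.append("")
--             continue
--         blocks.append("\n".join(block_lines).strip())
--         index += 1
--     return blocks
-- ===== SOURCE B (Python) =====
-- def _extract_assertion_blocks(doc_text: str) -> list[str]:
--     heading = "## Metric-Key Continuity Assertion"
--     SEARCHING, AWAIT_FENCE, IN_BLOCK = 0, 1, 2
--     blocks: list[str] = []
--     state = SEARCHING
--     acc: list[str] = []
--     for line in doc_text.splitlines():
--         s = line.strip()
--         if state == SEARCHING:
--             if s == heading: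
--                 state = AWAIT_FENCE
--         elif state == AWAIT_FENCE:
--             if s == "":
--                 continue
--             if s == "```json":
--                 acc = []
--                 state = IN_BLOCK
--             else:
--                 blocks.append("")
--                 state = AWAIT_FENCE if s == heading else SEARCHING
--         else:  # IN_BLOCK
--             if s == "```":
--                 blocks.append("\n".join(acc).strip())
--                 state = SEARCHING
--             else:
--                 acc.append(line)
--     if state != SEARCHING:
--         blocks.append("")
--     return blocks
-- ===== Notes on version B (the rewrite author's own statement) =====
-- stated objective: idiomatic
-- what changed: Replaced A's index-driven while loop with nested re-scanning inner while loops by a single flat pass over the lines driven by an explicit three-state machine (SEARCHING/AWAIT_FENCE/IN_BLOCK) with a trailing flush for EOF inside a pending heading or unclosed block.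
import Mathlib
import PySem

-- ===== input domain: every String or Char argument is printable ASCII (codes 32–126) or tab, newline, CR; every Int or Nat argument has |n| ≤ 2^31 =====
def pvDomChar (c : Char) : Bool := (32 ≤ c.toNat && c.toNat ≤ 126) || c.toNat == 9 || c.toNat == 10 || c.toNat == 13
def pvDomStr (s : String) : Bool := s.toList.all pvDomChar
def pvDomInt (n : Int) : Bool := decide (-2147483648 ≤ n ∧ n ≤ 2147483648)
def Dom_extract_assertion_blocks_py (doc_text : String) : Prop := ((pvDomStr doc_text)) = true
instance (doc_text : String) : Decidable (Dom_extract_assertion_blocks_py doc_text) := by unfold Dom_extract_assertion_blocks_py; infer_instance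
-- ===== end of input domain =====

-- B replaces A's index-based while loop with nested re-scanning inner loops by a single
-- flat pass: a three-state machine (SEARCHING / AWAIT_FENCE / IN_BLOCK) folded over the lines
-- (objective: simpler/idiomatic single pass; same O(n) cost).

def pvHeading : String := "## Metric-Key Continuity Assertion"

-- ===== PORT A =====
-- A's outer while loop and each of its inner while loops become one recursive helper each,
-- over the list of remaining lines (the suffix lines[index:]).
mutual
-- outer 'while index < len(lines)' loop
def pvALoop : List String → List String
  | [] => []
  | l :: rest =>
    if PySem.Str.strip l = pvHeading then pvAAfter rest else pvALoop rest
-- after a heading: 'while … strip == ""'; then the fence check; the missing-fence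
-- 'blocks.append(""); continue' re-examines the same line, so A's heading test is inlined
def pvAAfter : List String → List String
  | [] => [""]
  | l :: rest =>
    if PySem.Str.strip l = "" then pvAAfter rest
    else if PySem.Str.strip l = "```json" then pvABlock [] rest
    else "" :: (if PySem.Str.strip l = pvHeading then pvAAfter rest else pvALoop rest)
-- 'while … strip != "```"' collecting block_lines, then close or EOF
def pvABlock : List String → List String → List String
  | _, [] => [""]
  | acc, l :: rest =>
    if PySem.Str.strip l = "```" then
      PySem.Str.strip (PySem.Str.join "\n" acc) :: pvALoop rest
    else pvABlock (acc ++ [l]) rest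
end

def extract_assertion_blocks_py (doc_text : String) : List String :=
  pvALoop (PySem.Str.splitlines doc_text)

-- ===== PORT B =====
-- state 0 = SEARCHING, 1 = AWAIT_FENCE, 2 = IN_BLOCK; fold state = (state, acc, blocks)
def pvBStep (st : Int × List String × List String) (line : String) : Int × List String × List String :=
  let s := PySem.Str.strip line
  let state := st.1
  let acc := st.2.1
  let blocks := st.2.2
  if state = 0 then
    if s = pvHeading then (1, acc, blocks) else (0, acc, blocks)
  else if state = 1 then
    if s = "" then (1, acc, blocks)
    else if s = "```json" then (2, [], blocks)
    else if s = pvHeading then (1, acc, blocks ++ [""])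
    else (0, acc, blocks ++ [""])
  else
    if s = "```" then (0, acc, blocks ++ [PySem.Str.strip (PySem.Str.join "\n" acc)])
    else (2, acc ++ [line], blocks)

-- the trailing 'if state != SEARCHING: blocks.append("")'
def pvFinish (r : Int × List String × List String) : List String :=
  if r.1 ≠ 0 then r.2.2 ++ [""] else r.2.2

def extract_assertion_blocks_py_alt (doc_text : String) : List String :=
  pvFinish ((PySem.Str.splitlines doc_text).foldl pvBStep (0, [], []))

-- ===== PRECONDITION & SPEC =====
def Spec_extract_assertion_blocks_py (doc_text : String) (out : List String) : Prop := out = extract_assertion_blocks_py_alt doc_text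
instance (doc_text : String) (out : List String) : Decidable (Spec_extract_assertion_blocks_py doc_text out) := by unfold Spec_extract_assertion_blocks_py; infer_instance

-- ===== CLAIM (what is proved, stated in full; the proofs are below) =====
def Claim_equal_extract_assertion_blocks_py : Prop := ∀ (doc_text : String), Dom_extract_assertion_blocks_py doc_text → Spec_extract_assertion_blocks_py doc_text (extract_assertion_blocks_py doc_text)

-- ===== LEMMAS AND PROOFS =====
-- loop invariant: from each machine state, finishing the fold equals the corresponding
-- phase of A's recursion, appended to the blocks already emitted
lemma pvInvar : ∀ (lines blocks acc : List String),
    (pvFinish (lines.foldl pvBStep (0, acc, blocks)) = blocks ++ pvALoop lines)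
  ∧ (pvFinish (lines.foldl pvBStep (1, acc, blocks)) = blocks ++ pvAAfter lines)
  ∧ (pvFinish (lines.foldl pvBStep (2, acc, blocks)) = blocks ++ pvABlock acc lines) := by
  intro lines
  induction lines with
  | nil =>
      intro blocks acc
      refine ⟨?_, ?_, ?_⟩ <;> simp [pvFinish, pvALoop, pvAAfter, pvABlock]
  | cons l rest ih =>
      intro blocks acc
      refine ⟨?_, ?_, ?_⟩
      · by_cases h : PySem.Str.strip l = pvHeading
        · simpa [pvBStep, h, pvALoop] using (ih blocks acc).2.1
        · simpa [pvBStep, h, pvALoop] using (ih blocks acc).1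
      · by_cases h0 : PySem.Str.strip l = ""
        · have hh : PySem.Str.strip l ≠ pvHeading := by simp [h0, pvHeading]
          simpa [pvBStep, h0, hh, pvAAfter] using (ih blocks acc).2.1
        · by_cases h1 : PySem.Str.strip l = "```json"
          · have hh : PySem.Str.strip l ≠ pvHeading := by simp [h1, pvHeading]
            simpa [pvBStep, h0, h1, hh, pvAAfter] using (ih blocks []).2.2
          · by_cases h2 : PySem.Str.strip l = pvHeading
            · have := (ih (blocks ++ [""]) acc).2.1
              simp [pvBStep, h2, pvAAfter]
              simpa [List.append_assoc] using this
            · have := (ih (blocks ++ [""]) acc).1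
              simp [pvBStep, h0, h1, h2, pvAAfter]
              simpa [List.append_assoc] using this
      · by_cases h : PySem.Str.strip l = "```"
        · have := (ih (blocks ++ [PySem.Str.strip (PySem.Str.join "\n" acc)]) acc).1
          simp [pvBStep, h, pvABlock]
          simpa [List.append_assoc] using this
        · simpa [pvBStep, h, pvABlock] using (ih blocks (acc ++ [l])).2.2

-- ===== VERDICT (by name: the statement is the Claim_ definition above) =====
theorem extract_assertion_blocks_py_spec : Claim_equal_extract_assertion_blocks_py := by
  intro doc_text _
  unfold Spec_extract_assertion_blocks_py extract_assertion_blocks_py extract_assertion_blocks_py_alt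
  exact ((pvInvar (PySem.Str.splitlines doc_text) [] []).1).symm
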